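-- pv_equiv track=rewrite | github.com/opi9a/pharmex_tools | tools.py | remove_lead
-- ===== SOURCE A (Python) =====
-- def remove_lead(sales):
--     temp = []
--     is_up = False
--     for i in sales:
--         if i > 0:
--             temp.append(i)
--             is_up = True
--         elif is_up:
--             temp.append(i)
--     return temp
-- ===== SOURCE B (Python) =====
-- def remove_lead(sales):
--     for idx, v in enumerate(sales):
--         if v > 0:
--             return list(sales[idx:])
--     return []
-- ===== Notes on version B (the rewrite author's own statement) =====
-- stated objective: simpler
-- what changed: Instead of per-element append with an is_up flag, B finds the index of the first strictly-positive element and returns the suffix slice from there in one bulk copy.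
import Mathlib
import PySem

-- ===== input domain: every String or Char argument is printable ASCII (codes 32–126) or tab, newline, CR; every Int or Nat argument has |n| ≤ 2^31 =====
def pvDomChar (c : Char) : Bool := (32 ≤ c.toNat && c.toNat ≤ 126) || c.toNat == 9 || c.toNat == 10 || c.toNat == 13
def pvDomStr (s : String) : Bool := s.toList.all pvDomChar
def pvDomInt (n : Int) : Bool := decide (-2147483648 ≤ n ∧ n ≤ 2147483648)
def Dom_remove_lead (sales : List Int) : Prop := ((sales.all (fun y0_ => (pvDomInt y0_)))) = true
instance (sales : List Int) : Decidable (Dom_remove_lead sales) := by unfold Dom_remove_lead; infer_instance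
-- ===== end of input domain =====

-- B replaces A's per-element append-with-flag loop by find-first-positive-index then bulk suffix copy (simpler decomposition, same cost).


-- ===== PORT A =====
-- A: accumulate temp and is_up flag over the list
def remove_lead (sales : List Int) : List Int :=
  (sales.foldl (fun (st : List Int × Bool) i =>
      if i > 0 then (st.1 ++ [i], true)
      else if st.2 then (st.1 ++ [i], st.2)
      else st) ([], false)).1

-- ===== PORT B =====
-- B helper: index of the first strictly-positive element (the enumerate loop in Source B)
def pvFirstPos : List Int → Option Nat
  | [] => none
  | x :: xs => if x > 0 then some 0 else (pvFirstPos xs).map (· + 1)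

-- B: suffix slice sales[idx:] from the first positive, else []
def remove_lead_alt (sales : List Int) : List Int :=
  match pvFirstPos sales with
  | some idx => sales.drop idx
  | none => []

-- ===== PRECONDITION & SPEC =====
def Spec_remove_lead (sales : List Int) (out : List Int) : Prop := out = remove_lead_alt sales
instance (sales : List Int) (out : List Int) : Decidable (Spec_remove_lead sales out) := by unfold Spec_remove_lead; infer_instance

-- ===== CLAIM (what is proved, stated in full; the proofs are below) =====
def Claim_equal_remove_lead : Prop := ∀ (sales : List Int), Dom_remove_lead sales → Spec_remove_lead sales (remove_lead sales)

-- ===== LEMMAS AND PROOFS =====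
def pvStep : List Int × Bool → Int → List Int × Bool :=
  fun st i =>
    if i > 0 then (st.1 ++ [i], true)
    else if st.2 then (st.1 ++ [i], st.2)
    else st

theorem pvFold_true (l : List Int) (acc : List Int) :
    l.foldl pvStep (acc, true) = (acc ++ l, true) := by
  induction l generalizing acc with
  | nil => simp
  | cons x xs ih =>
    by_cases h : x > 0 <;> simp [pvStep, h, List.foldl_cons, ih]

theorem pvFold_false (l : List Int) (acc : List Int) :
    (l.foldl pvStep (acc, false)).1 = acc ++ remove_lead_alt l := by
  induction l generalizing acc with
  | nil => simp [remove_lead_alt, pvFirstPos]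
  | cons x xs ih =>
    by_cases h : x > 0
    · simp [pvStep, h, List.foldl_cons, pvFold_true, remove_lead_alt, pvFirstPos]
    · have hstep : pvStep (acc, false) x = (acc, false) := by simp [pvStep, h]
      rw [List.foldl_cons, hstep, ih]
      unfold remove_lead_alt
      simp only [pvFirstPos, h, if_neg, if_false]
      cases hfp : pvFirstPos xs with
      | none => simp [hfp]
      | some idx => simp [hfp, List.drop_succ_cons]

-- ===== VERDICT (by name: the statement is the Claim_ definition above) =====
theorem remove_lead_spec : Claim_equal_remove_lead := by
  intro sales _
  unfold Spec_remove_lead remove_lead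
  have := pvFold_false sales []
  simpa [pvStep] using this
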